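-- pv_equiv track=rewrite | github.com/phildenhoff/lyricline | lyricline/main.py | lyric_by_verse
-- ===== SOURCE A (Python) =====
-- def lyric_by_verse(lyrics):
--     current_verse = []
--     for line in lyrics.split("\n"):
--         if line == '':
--             if len(current_verse) > 0:
--                 yield str.join("\n", current_verse)
--                 current_verse = []
--             continue
--         elif line:
--             current_verse.append("\t\t" + line.strip())
-- ===== SOURCE B (Python) =====
-- def _verses(lines, cur):
--     # Recursive decomposition: head/tail recursion over the line list, building
--     # the verse list front-to-back by concatenation; the unterminated trailing
--     # run 'cur' is dropped at the base case.
--     if not lines: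
--         return []
--     head, rest = lines[0], lines[1:]
--     if head == '':
--         pre = ["\n".join(cur)] if cur else []
--         return pre + _verses(rest, [])
--     return _verses(rest, cur + ["\t\t" + head.strip()])
--
--
-- def lyric_by_verse(lyrics):
--     yield from _verses(lyrics.split("\n"), [])
-- ===== Notes on version B (the rewrite author's own statement) =====
-- stated objective: alternative
-- what changed: Replaces A's iterative flush-inside-the-loop state machine (mutating accumulator, yields interleaved with the loop) with a structurally recursive function over the line list that returns the verse list, dropping the unterminated trailing run at the recursion's base case and concatenating results front-to-back.
import Mathlib
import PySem

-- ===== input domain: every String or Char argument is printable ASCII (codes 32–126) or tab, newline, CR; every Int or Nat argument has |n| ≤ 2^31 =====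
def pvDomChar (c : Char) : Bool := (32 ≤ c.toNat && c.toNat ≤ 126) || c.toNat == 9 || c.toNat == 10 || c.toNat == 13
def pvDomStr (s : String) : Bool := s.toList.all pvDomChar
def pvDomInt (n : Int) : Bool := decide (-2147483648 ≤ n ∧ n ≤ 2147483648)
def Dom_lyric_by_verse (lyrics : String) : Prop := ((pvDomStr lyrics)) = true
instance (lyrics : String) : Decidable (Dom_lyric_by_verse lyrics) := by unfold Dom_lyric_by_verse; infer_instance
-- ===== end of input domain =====

-- B replaces A's iterative flush-inside-the-loop state machine with a
-- structurally recursive build of the verse list (same cost; return-value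
-- equivalence only, both Pythons are generators).


-- ===== PORT A =====
-- state = (yielded verses so far, current_verse); generator's yields collected in order
def lyricStepA (st : List String × List String) (line : String) : List String × List String :=
  if line == "" then
    (if st.2.length > 0 then (st.1 ++ [PySem.Str.join "\n" st.2], ([] : List String)) else st)
  else
    -- Python's 'elif line:' is necessarily true here (line ≠ "")
    (st.1, st.2 ++ ["\t\t" ++ PySem.Str.strip line])

def lyric_by_verse (lyrics : String) : List String :=
  (((PySem.Str.split? lyrics "\n").getD []).foldl lyricStepA ([], [])).1

-- ===== PORT B =====
-- recursion over the line list; 'cur' is the current (formatted) run,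
-- dropped unterminated at the base case, as in Source B's _verses
def lyricVerses : List String → List String → List String
  | [], _ => []
  | head :: rest, cur =>
    if head == "" then
      (if cur.isEmpty then [] else [PySem.Str.join "\n" cur]) ++ lyricVerses rest []
    else
      lyricVerses rest (cur ++ ["\t\t" ++ PySem.Str.strip head])

def lyric_by_verse_alt (lyrics : String) : List String :=
  lyricVerses ((PySem.Str.split? lyrics "\n").getD []) []

-- ===== PRECONDITION & SPEC =====
def Spec_lyric_by_verse (lyrics : String) (out : List String) : Prop := out = lyric_by_verse_alt lyrics
instance (lyrics : String) (out : List String) : Decidable (Spec_lyric_by_verse lyrics out) := by unfold Spec_lyric_by_verse; infer_instance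

-- ===== CLAIM =====
def Claim_equal_lyric_by_verse : Prop := ∀ (lyrics : String), Dom_lyric_by_verse lyrics → Spec_lyric_by_verse lyrics (lyric_by_verse lyrics)

-- ===== LEMMAS AND PROOFS =====
theorem lyric_fold_eq_verses (ls : List String) (acc cur : List String) :
    (ls.foldl lyricStepA (acc, cur)).1 = acc ++ lyricVerses ls cur := by
  induction ls generalizing acc cur with
  | nil => simp [lyricVerses]
  | cons l rest ih =>
    by_cases hl : l = ""
    · by_cases hc : cur = []
      · simp only [List.foldl_cons, lyricStepA, lyricVerses, hl, hc]
        simpa using ih acc []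
      · have hlen : cur.length > 0 := List.length_pos_iff.mpr hc
        simp only [List.foldl_cons, lyricStepA, lyricVerses, hl, hlen,
          List.isEmpty_iff, hc, BEq.rfl, if_true, if_false]
        rw [ih (acc ++ [PySem.Str.join "\n" cur]) []]
        simp
    · simp only [List.foldl_cons, lyricStepA, lyricVerses,
        if_neg (by simpa using hl : ¬ (l == "") = true)]
      exact ih acc (cur ++ ["\t\t" ++ PySem.Str.strip l])

-- ===== VERDICT =====
theorem lyric_by_verse_spec : Claim_equal_lyric_by_verse := by
  intro lyrics _
  unfold Spec_lyric_by_verse lyric_by_verse lyric_by_verse_alt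
  simpa using lyric_fold_eq_verses ((PySem.Str.split? lyrics "\n").getD []) [] []
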